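-- pv_equiv track=rewrite | github.com/jaewie/algorithms | python/maths/numeric.py | long_division
-- ===== SOURCE A (Python) =====
-- def long_division(x, y):
--     if y == 0:
--         raise ZeroDivisionError("Division by zero")
--     sign = get_sign(x, y)
--     x, y = abs(x), abs(y)
--
--     result = 0
--     remainder = 0
--     should_divide = lambda remainder: remainder >= y
--
--     for i in map(int, list(str(x))):
--         remainder = (remainder * 10) + i
--         count = 0
--         while should_divide(remainder):
--             remainder -= y
--             count += 1
--         result = (result * 10) + count
--     return sign * result
--
-- def get_sign(x, y):
--     '''Return the sign for multiplying or dividing x by y'''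
--     return -1 if (x < 0) ^ (y < 0) else 1
-- ===== SOURCE B (Python) =====
-- def long_division(x, y):
--     if y == 0:
--         raise ZeroDivisionError("Division by zero")
--     sign = -1 if (x < 0) ^ (y < 0) else 1
--     return sign * (abs(x) // abs(y))
-- ===== Notes on version B (the rewrite author's own statement) =====
-- stated objective: simpler
-- what changed: Replaces the decimal digit-by-digit long-division loop (with an inner repeated-subtraction loop) by a single closed-form integer division sign * (abs(x) // abs(y)).
import Mathlib
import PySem

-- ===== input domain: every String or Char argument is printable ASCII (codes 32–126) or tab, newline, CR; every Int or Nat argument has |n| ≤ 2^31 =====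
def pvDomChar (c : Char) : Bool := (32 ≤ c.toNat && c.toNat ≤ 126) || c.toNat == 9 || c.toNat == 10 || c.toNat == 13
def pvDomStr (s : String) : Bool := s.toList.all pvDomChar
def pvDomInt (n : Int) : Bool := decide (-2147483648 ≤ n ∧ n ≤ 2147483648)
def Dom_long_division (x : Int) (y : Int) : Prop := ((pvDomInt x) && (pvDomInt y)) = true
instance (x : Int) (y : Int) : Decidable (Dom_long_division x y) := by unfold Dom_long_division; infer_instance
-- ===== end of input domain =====

-- B replaces A's digit-by-digit long-division loop by the closed form sign * (|x| // |y|); objective: simpler.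

-- ===== PORT A =====
-- the inner 'while should_divide(remainder): remainder -= y; count += 1' loop;
-- the '0 < y' conjunct is a totality guard only (in A it always holds: y = abs(y) ≠ 0)
def ldWhile (remainder : Int) (y : Int) (count : Int) : Int × Int :=
  if h : y ≤ remainder ∧ 0 < y then ldWhile (remainder - y) y (count + 1)
  else (remainder, count)
  termination_by remainder.toNat
  decreasing_by omega

-- port of A; 'if y = 0 then 0' marks the ZeroDivisionError raise (excluded by Pre_).
-- map(int, list(str(x))): on the digit characters produced by str, int(c) = c.toNat - 48.
def long_division (x : Int) (y : Int) : Int :=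
  if y = 0 then 0
  else
    let sign : Int := if (decide (x < 0)).xor (decide (y < 0)) then -1 else 1
    let xa := |x|
    let ya := |y|
    let st := ((PySem.Int.toStr xa).toList.map (fun c => ((c.toNat : Int) - 48))).foldl
      (fun (st : Int × Int) i =>
        let remainder := st.2 * 10 + i
        let rc := ldWhile remainder ya 0
        (st.1 * 10 + rc.2, rc.1)) ((0 : Int), (0 : Int))
    sign * st.1

-- ===== PORT B =====
def long_division_alt (x : Int) (y : Int) : Int :=
  if y = 0 then 0
  else (if (x < 0) ≠ (y < 0) then (-1 : Int) else 1) * PySem.Int.floordiv |x| |y|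

-- ===== PRECONDITION & SPEC =====
-- Pre_ excludes exactly y = 0, where A raises ZeroDivisionError.
def Pre_long_division (x : Int) (y : Int) : Prop := y ≠ 0
instance (x : Int) (y : Int) : Decidable (Pre_long_division x y) := by unfold Pre_long_division; infer_instance
def pvWitness_long_division : Int × Int := (-7, 3)

def Spec_long_division (x : Int) (y : Int) (out : Int) : Prop := out = long_division_alt x y
instance (x : Int) (y : Int) (out : Int) : Decidable (Spec_long_division x y out) := by unfold Spec_long_division; infer_instance

-- ===== CLAIM (what is proved, stated in full; the proofs are below) =====
def Claim_equal_long_division : Prop := ∀ (x : Int) (y : Int), Dom_long_division x y → Pre_long_division x y → Spec_long_division x y (long_division x y)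

-- ===== LEMMAS AND PROOFS =====

-- the while loop computes quotient and remainder
theorem ldWhile_eq (r y c : Int) (hr : 0 ≤ r) (hy : 0 < y) :
    ldWhile r y c = (r % y, c + r / y) := by
  rw [ldWhile]
  split_ifs with h
  · rw [ldWhile_eq (r - y) y (c + 1) (by omega) hy]
    have h1 : r % y = (r - y) % y := by
      conv_lhs => rw [show r = (r - y) + 1 * y by ring]
      rw [Int.add_mul_emod_self_right]
    have h2 : r / y = (r - y) / y + 1 := by
      conv_lhs => rw [show r = (r - y) + 1 * y by ring]
      rw [Int.add_mul_ediv_right _ _ (by omega : y ≠ 0)]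
    rw [Prod.mk.injEq]
    constructor
    · rw [h1]
    · rw [h2]; ring
  · have h1 : r % y = r := Int.emod_eq_of_lt hr (by omega)
    have h2 : r / y = 0 := Int.ediv_eq_zero_of_lt hr (by omega)
    simp [h1, h2]
  termination_by r.toNat
  decreasing_by omega

-- toDigitsCore appends onto its accumulator
theorem toDigitsCore_append (fuel n : Nat) (ds : List Char) :
    Nat.toDigitsCore 10 fuel n ds = Nat.toDigitsCore 10 fuel n [] ++ ds := by
  induction fuel generalizing n ds with
  | zero => simp [Nat.toDigitsCore]
  | succ fuel ih =>
    simp only [Nat.toDigitsCore]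
    split_ifs with h
    · simp
    · rw [ih (n / 10) (Nat.digitChar (n % 10) :: ds),
          ih (n / 10) [Nat.digitChar (n % 10)]]
      simp

theorem digitChar_val (m : Nat) (hm : m < 10) :
    ((Nat.digitChar m).toNat : Int) - 48 = (m : Int) := by
  interval_cases m <;> decide

theorem digitChar_range (m : Nat) (hm : m < 10) :
    48 ≤ (Nat.digitChar m).toNat ∧ (Nat.digitChar m).toNat ≤ 57 := by
  interval_cases m <;> decide

-- folding the base-10 step over str(n) reconstructs n
theorem foldl_toDigitsCore (fuel n : Nat) (hfuel : n < fuel) :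
    (Nat.toDigitsCore 10 fuel n []).foldl (fun (v : Int) c => v * 10 + ((c.toNat : Int) - 48)) 0
      = (n : Int) := by
  induction fuel generalizing n with
  | zero => omega
  | succ fuel ih =>
    simp only [Nat.toDigitsCore]
    split_ifs with h
    · have hn : n < 10 := by omega
      simp only [List.foldl, Nat.mod_eq_of_lt hn]
      have := digitChar_val n hn
      linarith
    · rw [toDigitsCore_append, List.foldl_append]
      have hd : n / 10 < fuel := by
        have h10 : 10 ≤ n := by
          by_contra hc
          exact h (Nat.div_eq_of_lt (by omega))
        have := Nat.div_lt_self (by omega : 0 < n) (by omega : 1 < 10)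
        omega
      rw [ih (n / 10) hd]
      simp only [List.foldl]
      have := digitChar_val (n % 10) (Nat.mod_lt _ (by omega))
      have hsplit : (n : Int) = (n / 10 : Nat) * 10 + (n % 10 : Nat) := by
        push_cast
        omega
      linarith

theorem toDigitsCore_digit_mem (fuel n : Nat) (c : Char)
    (hc : c ∈ Nat.toDigitsCore 10 fuel n []) : 48 ≤ c.toNat ∧ c.toNat ≤ 57 := by
  induction fuel generalizing n with
  | zero => simp [Nat.toDigitsCore] at hc
  | succ fuel ih =>
    simp only [Nat.toDigitsCore] at hc
    split_ifs at hc with h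
    · simp at hc
      subst hc
      exact digitChar_range _ (Nat.mod_lt _ (by omega))
    · rw [toDigitsCore_append] at hc
      rcases List.mem_append.mp hc with h1 | h2
      · exact ih _ h1
      · simp at h2
        subst h2
        exact digitChar_range _ (Nat.mod_lt _ (by omega))

-- A's fold maintains (quotient, remainder) of the number read so far
theorem foldl_div_invariant (y : Int) (hy : 0 < y) (ds : List Int)
    (hds : ∀ d ∈ ds, 0 ≤ d) (v : Int) (hv : 0 ≤ v) :
    ds.foldl (fun (st : Int × Int) i =>
        let remainder := st.2 * 10 + i
        let rc := ldWhile remainder y 0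
        (st.1 * 10 + rc.2, rc.1)) (v / y, v % y)
      = (ds.foldl (fun v d => v * 10 + d) v / y, ds.foldl (fun v d => v * 10 + d) v % y) := by
  induction ds generalizing v with
  | nil => simp
  | cons d ds ih =>
    have hd : 0 ≤ d := hds d List.mem_cons_self
    have hm0 : 0 ≤ v % y := Int.emod_nonneg v hy.ne'
    have hrem : 0 ≤ v % y * 10 + d := by linarith
    simp only [List.foldl_cons]
    rw [ldWhile_eq _ _ _ hrem hy]
    have hrw : v * 10 + d = (v % y * 10 + d) + (v / y * 10) * y := by
      linear_combination (-10 : Int) * Int.mul_ediv_add_emod v y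
    have hdiv : (v * 10 + d) / y = (v % y * 10 + d) / y + v / y * 10 := by
      rw [hrw, Int.add_mul_ediv_right _ _ hy.ne']
    have hmod : (v * 10 + d) % y = (v % y * 10 + d) % y := by
      rw [hrw, Int.add_mul_emod_self_right]
    have e1 : v / y * 10 + (0 + (v % y * 10 + d) / y) = (v * 10 + d) / y := by
      rw [hdiv]; ring
    rw [e1, ← hmod]
    exact ih (fun e he => hds e (List.mem_cons_of_mem _ he)) (v * 10 + d) (by linarith)

theorem long_division_spec : Claim_equal_long_division := by
  intro x y _ hpre
  unfold Spec_long_division long_division long_division_alt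
  rw [if_neg hpre, if_neg hpre]
  have hya : (0 : Int) < |y| := abs_pos.mpr hpre
  have hxa : (0 : Int) ≤ |x| := abs_nonneg x
  have hchars : (PySem.Int.toStr |x|).toList = Nat.toDigits 10 (|x|).toNat := by
    rw [PySem.Int.toList_toStr]
    unfold PySem.Int.toChars
    rw [if_neg (by omega)]
  have hfold :
      ((PySem.Int.toStr |x|).toList.map (fun c => ((c.toNat : Int) - 48))).foldl
        (fun (st : Int × Int) i =>
          let remainder := st.2 * 10 + i
          let rc := ldWhile remainder |y| 0
          (st.1 * 10 + rc.2, rc.1)) ((0 : Int), (0 : Int))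
        = (|x| / |y|, |x| % |y|) := by
    set ds := (PySem.Int.toStr |x|).toList.map (fun c => ((c.toNat : Int) - 48)) with hds
    have hval : ds.foldl (fun v d => v * 10 + d) 0 = |x| := by
      rw [hds, hchars, List.foldl_map]
      unfold Nat.toDigits
      rw [foldl_toDigitsCore ((|x|).toNat + 1) (|x|).toNat (by omega)]
      omega
    have hpos : ∀ d ∈ ds, 0 ≤ d := by
      intro d hd
      rw [hds, List.mem_map] at hd
      obtain ⟨c, hc, rfl⟩ := hd
      rw [hchars] at hc
      have := toDigitsCore_digit_mem _ _ _ hc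
      omega
    have hinv := foldl_div_invariant |y| hya ds hpos 0 le_rfl
    simp only [Int.zero_ediv, Int.zero_emod] at hinv
    rw [hinv, hval]
  have hfd : PySem.Int.floordiv |x| |y| = |x| / |y| := by
    show (|x|).fdiv |y| = |x| / |y|
    rw [Int.fdiv_eq_ediv]
    simp [abs_nonneg y]
  simp only [hfold, hfd]
  by_cases hx : x < 0 <;> by_cases hy : y < 0 <;> simp [hx, hy]
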